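-- pv_equiv track=rewrite | github.com/hanzala-sohrab/CP | Codeforces/1914D.py | solve
-- ===== SOURCE A (Python) =====
-- from typing import List
--
-- def max_3(a: List[int]):
--     return sorted([(val, idx) for idx, val in enumerate(a)], reverse=True)[0:3]
--
-- def solve(n: int, a: List[int], b: List[int], c: List[int]) -> int:
--     max_a = max_3(a)
--     max_b = max_3(b)
--     max_c = max_3(c)
--
--     result = 0
--
--     for [v_a, d_a] in max_a:
--         for [v_b, d_b] in max_b:
--             for [v_c, d_c] in max_c:
--                 if d_a != d_b and d_b != d_c and d_c != d_a:
--                     result = max(result, v_a + v_b + v_c)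
--
--     return result
-- ===== SOURCE B (Python) =====
-- from typing import List
--
--
-- def solve(n: int, a: List[int], b: List[int], c: List[int]) -> int:
--     result = 0
--     for i, x in enumerate(a):
--         for j, y in enumerate(b):
--             for k, z in enumerate(c):
--                 if i != j and j != k and k != i:
--                     result = max(result, x + y + z)
--     return result
-- ===== Notes on version B (the rewrite author's own statement) =====
-- stated objective: simpler
-- what changed: Replaces the sort-based top-3 index table and its 27-combination scan by a direct exhaustive triple loop over all pairwise-distinct index triples of the full arrays.
import Mathlib
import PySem

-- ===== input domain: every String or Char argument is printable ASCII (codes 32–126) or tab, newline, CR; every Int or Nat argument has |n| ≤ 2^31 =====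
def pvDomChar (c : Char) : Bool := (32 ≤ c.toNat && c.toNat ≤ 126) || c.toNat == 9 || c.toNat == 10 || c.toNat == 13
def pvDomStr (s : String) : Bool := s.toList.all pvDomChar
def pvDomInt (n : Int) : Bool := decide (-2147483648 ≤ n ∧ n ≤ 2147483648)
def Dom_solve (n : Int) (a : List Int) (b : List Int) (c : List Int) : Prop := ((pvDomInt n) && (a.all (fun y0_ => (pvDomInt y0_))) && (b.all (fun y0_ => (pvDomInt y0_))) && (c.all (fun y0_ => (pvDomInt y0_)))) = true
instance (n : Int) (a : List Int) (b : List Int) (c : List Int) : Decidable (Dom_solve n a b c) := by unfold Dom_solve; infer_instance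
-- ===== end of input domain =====

-- B replaces A's sort-based top-3 index table (27-combination scan) by a direct
-- exhaustive loop over all pairwise-distinct index triples: simpler, not faster.

-- ===== PORT A =====
-- max_3(a) = sorted([(val, idx) for idx, val in enumerate(a)], reverse=True)[0:3]
def solve_max3 (a : List Int) : List (Int × Int) :=
  PySem.List.slice
    (PySem.List.sorted2
      ((PySem.List.enumerate a 0).map (fun p => (p.2, p.1)))
      (fun t => t.1) (fun t => t.2) true)
    (some 0) (some 3)

def solve (n : Int) (a : List Int) (b : List Int) (c : List Int) : Int :=
  (solve_max3 a).foldl (fun result pa =>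
    (solve_max3 b).foldl (fun result pb =>
      (solve_max3 c).foldl (fun result pc =>
        if pa.2 ≠ pb.2 ∧ pb.2 ≠ pc.2 ∧ pc.2 ≠ pa.2 then max result (pa.1 + pb.1 + pc.1)
        else result) result) result) 0

-- ===== PORT B =====
def solve_alt (n : Int) (a : List Int) (b : List Int) (c : List Int) : Int :=
  (PySem.List.enumerate a 0).foldl (fun result p =>
    (PySem.List.enumerate b 0).foldl (fun result q =>
      (PySem.List.enumerate c 0).foldl (fun result s =>
        if p.1 ≠ q.1 ∧ q.1 ≠ s.1 ∧ s.1 ≠ p.1 then max result (p.2 + q.2 + s.2)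
        else result) result) result) 0

-- ===== PRECONDITION & SPEC =====
def Spec_solve (n : Int) (a : List Int) (b : List Int) (c : List Int) (out : Int) : Prop := out = solve_alt n a b c
instance (n : Int) (a : List Int) (b : List Int) (c : List Int) (out : Int) : Decidable (Spec_solve n a b c out) := by unfold Spec_solve; infer_instance

-- ===== CLAIM (what is proved, stated in full; the proofs are below) =====
def Claim_equal_solve : Prop := ∀ (n : Int) (a : List Int) (b : List Int) (c : List Int), Dom_solve n a b c → Spec_solve n a b c (solve n a b c)

-- ===== LEMMAS AND PROOFS =====

-- generic fold machinery -----------------------------------------------------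
theorem pv_foldl_le_init {α : Type} (g : Int → α → Int) (hg : ∀ r x, r ≤ g r x) :
    ∀ (L : List α) (r0 : Int), r0 ≤ L.foldl g r0 := by
  intro L
  induction L with
  | nil => intro r0; simp
  | cons x t ih => intro r0; exact le_trans (hg r0 x) (ih (g r0 x))

theorem pv_foldl_mem_le {α : Type} (g : Int → α → Int) (hg : ∀ r x, r ≤ g r x)
    (v : Int) (x : α) (hx : ∀ r, v ≤ g r x) :
    ∀ (L : List α) (r0 : Int), x ∈ L → v ≤ L.foldl g r0 := by
  intro L
  induction L with
  | nil => intro r0 h; cases h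
  | cons y t ih =>
    intro r0 h
    rcases List.mem_cons.mp h with h | h
    · subst h
      exact le_trans (hx r0) (pv_foldl_le_init g hg t (g r0 x))
    · exact ih (g r0 y) h

theorem pv_foldl_cases {α : Type} (g : Int → α → Int) (C : α → Int → Prop)
    (hg : ∀ r x, g r x = r ∨ C x (g r x)) :
    ∀ (L : List α) (r0 : Int), L.foldl g r0 = r0 ∨ ∃ x ∈ L, C x (L.foldl g r0) := by
  intro L
  induction L with
  | nil => intro r0; left; rfl
  | cons y t ih =>
    intro r0
    rcases ih (g r0 y) with h | ⟨x, hx, hC⟩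
    · rw [List.foldl_cons, h]
      rcases hg r0 y with h2 | h2
      · left; exact h2
      · right; exact ⟨y, List.mem_cons_self, h2⟩
    · right
      exact ⟨x, List.mem_cons_of_mem _ hx, by rw [List.foldl_cons]; exact hC⟩

-- sorted2 with reverse=True has non-increasing first components ---------------
theorem pv_insertBy_pairwise {α : Type} (R : α → α → Prop) (before : α → α → Bool)
    (htrans : Transitive R)
    (h1 : ∀ x y, before x y = true → R x y)
    (h2 : ∀ x y, before x y = false → R y x)
    (x : α) : ∀ (ys : List α), ys.Pairwise R → (PySem.List.insertBy before x ys).Pairwise R := by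
  intro ys
  induction ys with
  | nil => intro _; simp [PySem.List.insertBy]
  | cons y t ih =>
    intro hp
    rcases List.pairwise_cons.mp hp with ⟨hy, ht⟩
    by_cases hb : before x y = true
    · rw [show PySem.List.insertBy before x (y :: t) = x :: y :: t by
        simp [PySem.List.insertBy, hb]]
      refine List.pairwise_cons.mpr ⟨?_, hp⟩
      intro z hz
      rcases List.mem_cons.mp hz with h | h
      · rw [h]; exact h1 x y hb
      · exact htrans (h1 x y hb) (hy z h)
    · rw [show PySem.List.insertBy before x (y :: t) = y :: PySem.List.insertBy before x t by
        simp [PySem.List.insertBy, hb]]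
      refine List.pairwise_cons.mpr ⟨?_, ih ht⟩
      intro z hz
      rcases (PySem.List.insertBy_mem_iff before x z t).mp hz with h | h
      · rw [h]; exact h2 x y (by simpa using hb)
      · exact hy z h

theorem pv_foldl_insertBy_pairwise {α : Type} (R : α → α → Prop) (before : α → α → Bool)
    (htrans : Transitive R)
    (h1 : ∀ x y, before x y = true → R x y)
    (h2 : ∀ x y, before x y = false → R y x) :
    ∀ (xs acc : List α), acc.Pairwise R →
      (xs.foldl (fun acc x => PySem.List.insertBy before x acc) acc).Pairwise R := by
  intro xs
  induction xs with
  | nil => intro acc h; simpa using h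
  | cons x t ih =>
    intro acc h
    exact ih _ (pv_insertBy_pairwise R before htrans h1 h2 x acc h)

theorem pv_sorted2_rev_pairwise (xs : List (Int × Int)) :
    (PySem.List.sorted2 xs (fun t => t.1) (fun t => t.2) true).Pairwise
      (fun p q : Int × Int => q.1 ≤ p.1) := by
  show (xs.foldl (fun acc x => PySem.List.insertBy
      (fun p q : Int × Int => decide (q.1 < p.1) || (!decide (p.1 < q.1) && decide (q.2 < p.2))) x acc)
      []).Pairwise (fun p q : Int × Int => q.1 ≤ p.1)
  apply pv_foldl_insertBy_pairwise
  · intro p q r hpq hqr; exact le_trans hqr hpq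
  · intro p q h; simp only [Bool.or_eq_true, Bool.and_eq_true, Bool.not_eq_true',
      decide_eq_true_eq, decide_eq_false_iff_not] at h; omega
  · intro p q h; simp only [Bool.or_eq_false_iff, Bool.and_eq_false_iff, Bool.not_eq_false',
      decide_eq_true_eq, decide_eq_false_iff_not] at h; omega
  · exact List.Pairwise.nil

-- facts about solve_max3 ------------------------------------------------------
theorem pv_sorted_eq (a : List Int) :
    solve_max3 a =
      (PySem.List.sorted2 ((PySem.List.enumerate a 0).map (fun p => (p.2, p.1)))
        (fun t => t.1) (fun t => t.2) true).take 3 := by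
  unfold solve_max3
  simp [PySem.List.slice_zero_start, PySem.List.slice_to]

theorem pv_mem_pairs {a : List Int} {p : Int × Int}
    (h : p ∈ (PySem.List.enumerate a 0).map (fun p : Int × Int => (p.2, p.1))) :
    ∃ (k : Nat) (hk : k < a.length), p = (a[k], (k : Int)) := by
  rcases List.mem_map.mp h with ⟨q, hq, hqp⟩
  rcases (PySem.List.mem_enumerate_iff _ _ _).mp hq with ⟨k, hk, hqe⟩
  refine ⟨k, hk, ?_⟩
  subst hqp; subst hqe; simp

theorem pv_max3_mem {a : List Int} {p : Int × Int} (h : p ∈ solve_max3 a) :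
    ∃ (k : Nat) (hk : k < a.length), p = (a[k], (k : Int)) := by
  rw [pv_sorted_eq] at h
  have h2 := List.mem_of_mem_take h
  exact pv_mem_pairs ((PySem.List.sorted2_perm _ _ _ _).mem_iff.mp h2)

theorem pv_max3_nodup (a : List Int) : ((solve_max3 a).map (·.2)).Nodup := by
  rw [pv_sorted_eq]
  have hperm := (PySem.List.sorted2_perm ((PySem.List.enumerate a 0).map (fun p : Int × Int => (p.2, p.1)))
    (fun t => t.1) (fun t => t.2) true).map (fun p : Int × Int => p.2)
  have hnd : (((PySem.List.enumerate a 0).map (fun p : Int × Int => (p.2, p.1))).map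
      (fun p : Int × Int => p.2)).Nodup := by
    rw [List.map_map]
    have he : ((fun p : Int × Int => p.2) ∘ (fun p : Int × Int => (p.2, p.1))) =
        (fun p : Int × Int => p.1) := rfl
    rw [he, PySem.List.map_fst_enumerate]
    exact PySem.List.nodup_pyRange_one _ _
  exact ((hperm.nodup_iff).mpr hnd).sublist ((List.take_sublist 3 _).map _)

theorem pv_max3_global {a : List Int} {i : Nat} (hi : i < a.length)
    (hnot : (i : Int) ∉ (solve_max3 a).map (·.2)) :
    ∀ p ∈ solve_max3 a, a[i] ≤ p.1 := by
  intro p hp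
  rw [pv_sorted_eq] at hp hnot
  have hmem : ((a[i], (i : Int)) : Int × Int) ∈
      PySem.List.sorted2 ((PySem.List.enumerate a 0).map (fun p : Int × Int => (p.2, p.1)))
        (fun t => t.1) (fun t => t.2) true := by
    apply (PySem.List.sorted2_perm _ _ _ _).mem_iff.mpr
    exact List.mem_map.mpr ⟨((i : Int), a[i]),
      (PySem.List.mem_enumerate_iff _ _ _).mpr ⟨i, hi, by simp⟩, rfl⟩
  have hnotin : ((a[i], (i : Int)) : Int × Int) ∉
      (PySem.List.sorted2 ((PySem.List.enumerate a 0).map (fun p : Int × Int => (p.2, p.1)))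
        (fun t => t.1) (fun t => t.2) true).take 3 := by
    intro hcon
    exact hnot (List.mem_map.mpr ⟨_, hcon, rfl⟩)
  have hdrop : ((a[i], (i : Int)) : Int × Int) ∈
      (PySem.List.sorted2 ((PySem.List.enumerate a 0).map (fun p : Int × Int => (p.2, p.1)))
        (fun t => t.1) (fun t => t.2) true).drop 3 := by
    have hmem2 := hmem
    rw [← List.take_append_drop 3 (PySem.List.sorted2 _ _ _ _)] at hmem2
    rcases List.mem_append.mp hmem2 with h | h
    · exact absurd h hnotin
    · exact h
  have hpw := pv_sorted2_rev_pairwise ((PySem.List.enumerate a 0).map (fun p : Int × Int => (p.2, p.1)))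
  rw [← List.take_append_drop 3 (PySem.List.sorted2 _ _ _ _)] at hpw
  have := (List.pairwise_append.mp hpw).2.2 p hp _ hdrop
  simpa using this

theorem pv_max3_full {a : List Int} {i : Nat} (hi : i < a.length)
    (hnot : (i : Int) ∉ (solve_max3 a).map (·.2)) :
    (solve_max3 a).length = 3 := by
  rw [pv_sorted_eq] at *
  set S := PySem.List.sorted2 ((PySem.List.enumerate a 0).map (fun p : Int × Int => (p.2, p.1)))
    (fun t => t.1) (fun t => t.2) true with hS
  by_cases h3 : 3 ≤ S.length
  · rw [List.length_take]; omega
  · exfalso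
    have htake : S.take 3 = S := List.take_of_length_le (by omega)
    have hmem : ((a[i], (i : Int)) : Int × Int) ∈ S := by
      apply (PySem.List.sorted2_perm _ _ _ _).mem_iff.mpr
      exact List.mem_map.mpr ⟨((i : Int), a[i]),
        (PySem.List.mem_enumerate_iff _ _ _).mpr ⟨i, hi, by simp⟩, rfl⟩
    exact hnot (List.mem_map.mpr ⟨_, htake ▸ hmem, rfl⟩)

theorem pv_pick (a : List Int) (i : Nat) (hi : i < a.length) (x y : Int)
    (hx : (i : Int) ≠ x) (hy : (i : Int) ≠ y) :
    ∃ p ∈ solve_max3 a, p.2 ≠ x ∧ p.2 ≠ y ∧ a[i] ≤ p.1 := by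
  by_cases hin : (i : Int) ∈ (solve_max3 a).map (·.2)
  · rcases List.mem_map.mp hin with ⟨p, hp, hpi⟩
    rcases pv_max3_mem hp with ⟨k, hk, hpe⟩
    have hki : k = i := by
      have : (k : Int) = (i : Int) := by rw [hpe] at hpi; simpa using hpi
      exact_mod_cast this
    subst hki
    refine ⟨p, hp, ?_, ?_, ?_⟩
    · simpa [hpi] using hx
    · simpa [hpi] using hy
    · rw [hpe]
  · have hlen := pv_max3_full hi hin
    have hall := pv_max3_global hi hin
    have hnd := pv_max3_nodup a
    rcases List.length_eq_three.mp hlen with ⟨p1, p2, p3, hm⟩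
    rw [hm] at hall hnd ⊢
    simp only [List.map_cons, List.map_nil, List.nodup_cons, List.mem_cons,
      List.mem_singleton, List.not_mem_nil, or_false, not_or, List.nodup_nil, and_true] at hnd
    by_cases e1 : p1.2 ≠ x ∧ p1.2 ≠ y
    · exact ⟨p1, by simp, e1.1, e1.2, hall p1 (by simp)⟩
    · by_cases e2 : p2.2 ≠ x ∧ p2.2 ≠ y
      · exact ⟨p2, by simp, e2.1, e2.2, hall p2 (by simp)⟩
      · refine ⟨p3, by simp, ?_, ?_, hall p3 (by simp)⟩
        · omega
        · omega

-- bounds for the two programs -------------------------------------------------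
theorem pv_solve_ge (n : Int) (a b c : List Int) : 0 ≤ solve n a b c := by
  unfold solve
  apply pv_foldl_le_init
  intro r pa
  apply pv_foldl_le_init
  intro r2 pb
  apply pv_foldl_le_init
  intro r3 pc
  split_ifs
  · exact le_max_left _ _
  · exact le_rfl

theorem pv_solve_alt_ge (n : Int) (a b c : List Int) : 0 ≤ solve_alt n a b c := by
  unfold solve_alt
  apply pv_foldl_le_init
  intro r p
  apply pv_foldl_le_init
  intro r2 q
  apply pv_foldl_le_init
  intro r3 s
  split_ifs
  · exact le_max_left _ _
  · exact le_rfl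

theorem pv_solve_le (n : Int) (a b c : List Int) :
    ∀ p ∈ solve_max3 a, ∀ q ∈ solve_max3 b, ∀ s ∈ solve_max3 c,
      p.2 ≠ q.2 → q.2 ≠ s.2 → s.2 ≠ p.2 → p.1 + q.1 + s.1 ≤ solve n a b c := by
  intro p hp q hq s hs h1 h2 h3
  unfold solve
  refine pv_foldl_mem_le _ ?_ _ p ?_ _ _ hp
  · intro r pa
    apply pv_foldl_le_init
    intro r2 pb
    apply pv_foldl_le_init
    intro r3 pc
    split_ifs
    · exact le_max_left _ _
    · exact le_rfl
  · intro r
    refine pv_foldl_mem_le _ ?_ _ q ?_ _ _ hq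
    · intro r2 pb
      apply pv_foldl_le_init
      intro r3 pc
      split_ifs
      · exact le_max_left _ _
      · exact le_rfl
    · intro r2
      refine pv_foldl_mem_le _ ?_ _ s ?_ _ _ hs
      · intro r3 pc
        split_ifs
        · exact le_max_left _ _
        · exact le_rfl
      · intro r3
        rw [if_pos ⟨h1, h2, h3⟩]
        exact le_max_right _ _

theorem pv_solve_alt_le (n : Int) (a b c : List Int) :
    ∀ p ∈ PySem.List.enumerate a 0, ∀ q ∈ PySem.List.enumerate b 0, ∀ s ∈ PySem.List.enumerate c 0,
      p.1 ≠ q.1 → q.1 ≠ s.1 → s.1 ≠ p.1 → p.2 + q.2 + s.2 ≤ solve_alt n a b c := by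
  intro p hp q hq s hs h1 h2 h3
  unfold solve_alt
  refine pv_foldl_mem_le _ ?_ _ p ?_ _ _ hp
  · intro r pa
    apply pv_foldl_le_init
    intro r2 pb
    apply pv_foldl_le_init
    intro r3 pc
    split_ifs
    · exact le_max_left _ _
    · exact le_rfl
  · intro r
    refine pv_foldl_mem_le _ ?_ _ q ?_ _ _ hq
    · intro r2 pb
      apply pv_foldl_le_init
      intro r3 pc
      split_ifs
      · exact le_max_left _ _
      · exact le_rfl
    · intro r2
      refine pv_foldl_mem_le _ ?_ _ s ?_ _ _ hs
      · intro r3 pc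
        split_ifs
        · exact le_max_left _ _
        · exact le_rfl
      · intro r3
        rw [if_pos ⟨h1, h2, h3⟩]
        exact le_max_right _ _

theorem pv_solve_cases (n : Int) (a b c : List Int) :
    solve n a b c = 0 ∨
      ∃ p ∈ solve_max3 a, ∃ q ∈ solve_max3 b, ∃ s ∈ solve_max3 c,
        (p.2 ≠ q.2 ∧ q.2 ≠ s.2 ∧ s.2 ≠ p.2) ∧ solve n a b c = p.1 + q.1 + s.1 := by
  unfold solve
  refine pv_foldl_cases _
    (fun (p : Int × Int) (v : Int) => ∃ q ∈ solve_max3 b, ∃ s ∈ solve_max3 c,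
      (p.2 ≠ q.2 ∧ q.2 ≠ s.2 ∧ s.2 ≠ p.2) ∧ v = p.1 + q.1 + s.1) ?_ _ _
  intro r p
  refine pv_foldl_cases _
    (fun (q : Int × Int) (v : Int) => ∃ s ∈ solve_max3 c,
      (p.2 ≠ q.2 ∧ q.2 ≠ s.2 ∧ s.2 ≠ p.2) ∧ v = p.1 + q.1 + s.1) ?_ _ _
  intro r2 q
  refine pv_foldl_cases _
    (fun (s : Int × Int) (v : Int) => (p.2 ≠ q.2 ∧ q.2 ≠ s.2 ∧ s.2 ≠ p.2) ∧ v = p.1 + q.1 + s.1) ?_ _ _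
  intro r3 s
  split_ifs with h
  · rcases le_or_gt (p.1 + q.1 + s.1) r3 with hle | hlt
    · left; exact max_eq_left hle
    · right; exact ⟨h, max_eq_right (le_of_lt hlt)⟩
  · left; rfl

theorem pv_solve_alt_cases (n : Int) (a b c : List Int) :
    solve_alt n a b c = 0 ∨
      ∃ p ∈ PySem.List.enumerate a 0, ∃ q ∈ PySem.List.enumerate b 0, ∃ s ∈ PySem.List.enumerate c 0,
        (p.1 ≠ q.1 ∧ q.1 ≠ s.1 ∧ s.1 ≠ p.1) ∧ solve_alt n a b c = p.2 + q.2 + s.2 := by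
  unfold solve_alt
  refine pv_foldl_cases _
    (fun (p : Int × Int) (v : Int) => ∃ q ∈ PySem.List.enumerate b 0, ∃ s ∈ PySem.List.enumerate c 0,
      (p.1 ≠ q.1 ∧ q.1 ≠ s.1 ∧ s.1 ≠ p.1) ∧ v = p.2 + q.2 + s.2) ?_ _ _
  intro r p
  refine pv_foldl_cases _
    (fun (q : Int × Int) (v : Int) => ∃ s ∈ PySem.List.enumerate c 0,
      (p.1 ≠ q.1 ∧ q.1 ≠ s.1 ∧ s.1 ≠ p.1) ∧ v = p.2 + q.2 + s.2) ?_ _ _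
  intro r2 q
  refine pv_foldl_cases _
    (fun (s : Int × Int) (v : Int) => (p.1 ≠ q.1 ∧ q.1 ≠ s.1 ∧ s.1 ≠ p.1) ∧ v = p.2 + q.2 + s.2) ?_ _ _
  intro r3 s
  split_ifs with h
  · rcases le_or_gt (p.2 + q.2 + s.2) r3 with hle | hlt
    · left; exact max_eq_left hle
    · right; exact ⟨h, max_eq_right (le_of_lt hlt)⟩
  · left; rfl

-- ===== VERDICT (by name: the statement is the Claim_ definition above) =====
theorem solve_spec : Claim_equal_solve := by
  intro n a b c _
  unfold Spec_solve
  apply le_antisymm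
  · rcases pv_solve_cases n a b c with h | ⟨p, hp, q, hq, s, hs, ⟨d1, d2, d3⟩, he⟩
    · rw [h]; exact pv_solve_alt_ge n a b c
    · rw [he]
      rcases pv_max3_mem hp with ⟨i, hi, hpe⟩
      rcases pv_max3_mem hq with ⟨j, hj, hqe⟩
      rcases pv_max3_mem hs with ⟨k, hk, hse⟩
      have hpm : ((p.2, p.1) : Int × Int) ∈ PySem.List.enumerate a 0 :=
        (PySem.List.mem_enumerate_iff _ _ _).mpr ⟨i, hi, by rw [hpe]; simp⟩
      have hqm : ((q.2, q.1) : Int × Int) ∈ PySem.List.enumerate b 0 :=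
        (PySem.List.mem_enumerate_iff _ _ _).mpr ⟨j, hj, by rw [hqe]; simp⟩
      have hsm : ((s.2, s.1) : Int × Int) ∈ PySem.List.enumerate c 0 :=
        (PySem.List.mem_enumerate_iff _ _ _).mpr ⟨k, hk, by rw [hse]; simp⟩
      exact pv_solve_alt_le n a b c (p.2, p.1) hpm (q.2, q.1) hqm (s.2, s.1) hsm d1 d2 d3
  · rcases pv_solve_alt_cases n a b c with h | ⟨p, hp, q, hq, s, hs, ⟨d1, d2, d3⟩, he⟩
    · rw [h]; exact pv_solve_ge n a b c
    · rw [he]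
      rcases (PySem.List.mem_enumerate_iff _ _ _).mp hp with ⟨i, hi, hpe⟩
      rcases (PySem.List.mem_enumerate_iff _ _ _).mp hq with ⟨j, hj, hqe⟩
      rcases (PySem.List.mem_enumerate_iff _ _ _).mp hs with ⟨k, hk, hse⟩
      subst hpe; subst hqe; subst hse
      simp only [zero_add] at d1 d2 d3 ⊢
      obtain ⟨pa, hpa, hax, hay, hva⟩ := pv_pick a i hi (j : Int) (k : Int) d1 (Ne.symm d3)
      obtain ⟨qb, hqb, hbx, hby, hvb⟩ := pv_pick b j hj pa.2 (k : Int) (Ne.symm hax) d2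
      obtain ⟨sc, hsc, hcx, hcy, hvc⟩ := pv_pick c k hk pa.2 qb.2 (Ne.symm hay) (Ne.symm hby)
      exact le_trans (add_le_add (add_le_add hva hvb) hvc)
        (pv_solve_le n a b c pa hpa qb hqb sc hsc (Ne.symm hbx) (Ne.symm hcy) hcx)
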